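-- pv_equiv track=rewrite | github.com/taner-h/advent-of-code-2024 | day4_python ★★/part1.py | check_move_destination
-- ===== SOURCE A (Python) =====
-- def check_if_out_of_bound(position, movement, column_count, row_count):
--     row, column = position
--     new_row = row + movement[0]
--     new_column = column + movement[1]
--
--     if new_row < 0 or new_row >= row_count:
--         return True
--     if new_column < 0 or new_column >= column_count:
--         return True
--     return False
--
-- def check_move_destination(grid, position, movement, char_found):
--     chars = ["M", "A", "S"]
--     char_to_search = chars[char_found]
--
--     x, y = position
--     new_x = x + movement[0]
--     new_y = y + movement[1]
--
--     row_count = len(grid)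
--     column_count = len(grid[0])
--
--     if check_if_out_of_bound((x, y), movement, column_count, row_count):
--         return False
--
--     if grid[new_x][new_y] == char_to_search:
--         char_found += 1
--         if char_found == len(chars):
--             return True
--         return check_move_destination(grid, (new_x, new_y), movement, char_found)
--     return False
-- ===== SOURCE B (Python) =====
-- def check_move_destination(grid, position, movement, char_found):
--     chars = ["M", "A", "S"]
--     rows = len(grid)
--     cols = len(grid[0])
--     x, y = position
--     dx, dy = movement
--     i = char_found
--     while i < 3:
--         target = chars[i]
--         nx = x + dx
--         ny = y + dy
--         if not (0 <= nx < rows and 0 <= ny < cols):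
--             return False
--         if grid[nx][ny] != target:
--             return False
--         x, y = nx, ny
--         i += 1
--     return True
-- ===== Notes on version B (the rewrite author's own statement) =====
-- stated objective: simpler
-- what changed: Replaced A's tail recursion through a separate bound-check helper by a single explicit while-loop that advances (x,y) and the char index in place, with the bound check inlined; Pre_ excludes the inputs where A raises IndexError (char_found outside [-3,3), empty grid, ragged grids whose walk reaches a too-short row).
-- outside the precondition, e.g. on check_move_destination([['M', 'X'], ['A', 'B'], ['C']], (0, 1), (1, 0), 0): A returns False, B returns False
import Mathlib
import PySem

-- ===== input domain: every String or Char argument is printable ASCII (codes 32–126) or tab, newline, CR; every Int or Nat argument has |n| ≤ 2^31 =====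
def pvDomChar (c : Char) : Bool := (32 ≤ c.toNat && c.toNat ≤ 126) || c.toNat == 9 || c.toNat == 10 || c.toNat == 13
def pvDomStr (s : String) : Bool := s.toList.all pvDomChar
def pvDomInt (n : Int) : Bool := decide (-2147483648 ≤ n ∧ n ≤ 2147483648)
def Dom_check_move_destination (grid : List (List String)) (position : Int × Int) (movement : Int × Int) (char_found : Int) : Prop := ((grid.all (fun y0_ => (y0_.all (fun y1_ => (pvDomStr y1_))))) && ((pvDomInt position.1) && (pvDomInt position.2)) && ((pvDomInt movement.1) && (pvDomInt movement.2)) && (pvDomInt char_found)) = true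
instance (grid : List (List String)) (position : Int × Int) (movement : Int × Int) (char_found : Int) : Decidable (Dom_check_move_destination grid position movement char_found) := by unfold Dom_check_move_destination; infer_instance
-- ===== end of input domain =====

-- B rewrites A's tail recursion (with its bound-check helper) as one explicit while-loop; objective: simpler. Return values agree on Pre_.

-- ===== PORT A =====
def check_if_out_of_bound (position : Int × Int) (movement : Int × Int) (column_count : Int) (row_count : Int) : Bool :=
  let row := position.1
  let column := position.2
  let new_row := row + movement.1
  let new_column := column + movement.2
  if new_row < 0 || new_row ≥ row_count then true
  else if new_column < 0 || new_column ≥ column_count then true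
  else false

-- fuel is only a structural guard for the recursion: at every call fuel = (3 - char_found).toNat,
-- so fuel = 0 coincides with chars[char_found] being out of range (where Python raises and the port returns false).
def check_move_destination_go (grid : List (List String)) (movement : Int × Int) (fuel : Nat) (position : Int × Int) (char_found : Int) : Bool :=
  match fuel with
  | 0 => false
  | fuel + 1 =>
    match PySem.List.pyGet? ["M", "A", "S"] char_found with
    | none => false  -- Python: chars[char_found] raises IndexError; excluded by Pre_
    | some char_to_search =>
      let x := position.1
      let y := position.2
      let new_x := x + movement.1
      let new_y := y + movement.2
      let row_count : Int := grid.length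
      match PySem.List.pyGet? grid 0 with
      | none => false  -- Python: grid[0] raises IndexError on empty grid; excluded by Pre_
      | some row0 =>
        let column_count : Int := row0.length
        if check_if_out_of_bound (x, y) movement column_count row_count then false
        else
          match PySem.List.pyGet? grid new_x with
          | none => false  -- unreachable after the bound check
          | some row =>
            match PySem.List.pyGet? row new_y with
            | none => false  -- Python: raises IndexError (ragged row); excluded by Pre_
            | some c =>
              if c == char_to_search then
                if char_found + 1 == 3 then true
                else check_move_destination_go grid movement fuel (new_x, new_y) (char_found + 1)
              else false

def check_move_destination (grid : List (List String)) (position : Int × Int) (movement : Int × Int) (char_found : Int) : Bool :=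
  check_move_destination_go grid movement (3 - char_found).toNat position char_found

-- ===== PORT B =====
-- fuel is only a structural guard: at every call fuel = (3 - i).toNat, so fuel = 0 coincides with i ≥ 3.
def pvAltLoop (grid : List (List String)) (rows : Int) (cols : Int) (movement : Int × Int) (fuel : Nat) (x : Int) (y : Int) (i : Int) : Bool :=
  match fuel with
  | 0 => true
  | fuel + 1 =>
    if i < 3 then
      match PySem.List.pyGet? ["M", "A", "S"] i with
      | none => false  -- Python: chars[i] raises IndexError (i < -3); excluded by Pre_
      | some target =>
        let nx := x + movement.1
        let ny := y + movement.2
        if 0 ≤ nx ∧ nx < rows ∧ 0 ≤ ny ∧ ny < cols then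
          match PySem.List.pyGet? grid nx with
          | none => false  -- unreachable when rows = grid.length
          | some row =>
            match PySem.List.pyGet? row ny with
            | none => false  -- Python: raises IndexError (ragged row); excluded by Pre_
            | some c =>
              if c == target then pvAltLoop grid rows cols movement fuel nx ny (i + 1)
              else false
        else false
    else true

def check_move_destination_alt (grid : List (List String)) (position : Int × Int) (movement : Int × Int) (char_found : Int) : Bool :=
  match PySem.List.pyGet? grid 0 with
  | none => false  -- Python: len(grid[0]) raises IndexError on empty grid; excluded by Pre_
  | some row0 =>
    pvAltLoop grid grid.length row0.length movement (3 - char_found).toNat position.1 position.2 char_found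

-- ===== PRECONDITION & SPEC =====
-- Pre_ excludes: char_found outside [-3,3) and empty grids (A raises IndexError there), and ragged grids
-- where the in-bounds walk of ≤ 6 steps reaches a row shorter than len(grid[0]) (A raises IndexError there;
-- the row-length condition is a closed-form over-approximation, so it also excludes some ragged inputs on
-- which A returns because a character mismatch stops the walk earlier — see the cited example).
def Pre_check_move_destination (grid : List (List String)) (position : Int × Int) (movement : Int × Int) (char_found : Int) : Prop :=
  grid ≠ [] ∧ -3 ≤ char_found ∧ char_found < 3 ∧
  ∀ k ∈ ([1, 2, 3, 4, 5, 6] : List Int), k ≤ 3 - char_found →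
    (0 ≤ position.1 + k * movement.1 ∧ position.1 + k * movement.1 < (grid.length : Int) ∧
     0 ≤ position.2 + k * movement.2 ∧ position.2 + k * movement.2 < ((grid.headD []).length : Int)) →
    position.2 + k * movement.2 < ((grid.getD (position.1 + k * movement.1).toNat []).length : Int)
instance (grid : List (List String)) (position : Int × Int) (movement : Int × Int) (char_found : Int) : Decidable (Pre_check_move_destination grid position movement char_found) := by unfold Pre_check_move_destination; infer_instance

def pvWitness_check_move_destination : List (List String) × (Int × Int) × (Int × Int) × Int :=
  ([["X", "M", "A", "S"]], (0, 0), (0, 1), 0)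

def Spec_check_move_destination (grid : List (List String)) (position : Int × Int) (movement : Int × Int) (char_found : Int) (out : Bool) : Prop := out = check_move_destination_alt grid position movement char_found
instance (grid : List (List String)) (position : Int × Int) (movement : Int × Int) (char_found : Int) (out : Bool) : Decidable (Spec_check_move_destination grid position movement char_found out) := by unfold Spec_check_move_destination; infer_instance

-- ===== CLAIM (what is proved, stated in full; the proofs are below) =====
def Claim_equal_check_move_destination : Prop := ∀ (grid : List (List String)) (position : Int × Int) (movement : Int × Int) (char_found : Int), Dom_check_move_destination grid position movement char_found → Pre_check_move_destination grid position movement char_found → Spec_check_move_destination grid position movement char_found (check_move_destination grid position movement char_found)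

-- ===== LEMMAS AND PROOFS =====

-- A's bound-check helper says "true" exactly when B's inlined in-bounds test says "not in bounds".
lemma out_of_bound_iff (x y dx dy cc rc : Int) :
    check_if_out_of_bound (x, y) (dx, dy) cc rc
      = !(decide (0 ≤ x + dx ∧ x + dx < rc ∧ 0 ≤ y + dy ∧ y + dy < cc)) := by
  simp only [check_if_out_of_bound]
  by_cases h1 : x + dx < 0 ∨ rc ≤ x + dx
  · have : (x + dx < 0 || x + dx ≥ rc) = true := by simp; omega
    simp only [this, if_true]
    simp; omega
  · have : (x + dx < 0 || x + dx ≥ rc) = false := by simp; omega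
    simp only [this, Bool.false_eq_true, if_false]
    by_cases h2 : y + dy < 0 ∨ cc ≤ y + dy
    · have : (y + dy < 0 || y + dy ≥ cc) = true := by simp; omega
      simp only [this, if_true]; simp; omega
    · have : (y + dy < 0 || y + dy ≥ cc) = false := by simp; omega
      simp only [this, Bool.false_eq_true, if_false]; simp; omega

-- The two ports agree for every char_found < 3 (no Pre_ needed beyond that bound).
lemma ports_agree (grid : List (List String)) (movement : Int × Int) :
    ∀ (fuel : Nat) (x y cf : Int), fuel = (3 - cf).toNat → cf < 3 →
      check_move_destination_go grid movement fuel (x, y) cf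
        = check_move_destination_alt grid (x, y) movement cf := by
  intro fuel
  induction fuel with
  | zero => intro x y cf hfe h3; omega
  | succ n ih =>
    intro x y cf hfe h3
    obtain ⟨dx, dy⟩ := movement
    rw [check_move_destination_go, check_move_destination_alt]
    rw [show (3 - cf).toNat = n + 1 from hfe.symm]
    cases hg : PySem.List.pyGet? grid 0 with
    | none =>
      cases hc : PySem.List.pyGet? ["M", "A", "S"] cf <;> simp
    | some row0 =>
      dsimp only
      rw [pvAltLoop.eq_def]
      dsimp only
      simp only [h3, if_true]
      cases hc : PySem.List.pyGet? ["M", "A", "S"] cf with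
      | none => rfl
      | some target =>
        dsimp only
        by_cases hb : 0 ≤ x + dx ∧ x + dx < (grid.length : Int) ∧ 0 ≤ y + dy ∧ y + dy < (row0.length : Int)
        · have ha : check_if_out_of_bound (x, y) (dx, dy) (row0.length : Int) (grid.length : Int) = false := by
            rw [out_of_bound_iff]; simpa using hb
          rw [if_pos hb, ha]
          simp only [Bool.false_eq_true, if_false]
          cases hr : PySem.List.pyGet? grid (x + dx) with
          | none => rfl
          | some row =>
            dsimp only
            cases hcell : PySem.List.pyGet? row (y + dy) with
            | none => rfl
            | some c =>
              dsimp only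
              by_cases hm : (c == target) = true
              · rw [if_pos hm, if_pos hm]
                by_cases h33 : cf + 1 = 3
                · have hn0 : n = 0 := by omega
                  have he : (cf + 1 == 3) = true := by simp [h33]
                  rw [if_pos he, hn0, pvAltLoop]
                · have hne : ¬ ((cf + 1 == 3) = true) := by simp [h33]
                  rw [if_neg hne]
                  have hlt : cf + 1 < 3 := by
                    have hcc : PySem.List.pyGet? ["M", "A", "S"] cf ≠ none := by simp [hc]
                    rw [Ne, PySem.List.pyGet?_eq_none_iff] at hcc
                    simp [PySem.Raise.InRange] at hcc
                    omega
                  rw [ih (x + dx) (y + dy) (cf + 1) (by omega) hlt]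
                  rw [check_move_destination_alt]
                  simp only [hg]
                  congr 1
                  omega
              · rw [if_neg hm, if_neg hm]
        · have ha : check_if_out_of_bound (x, y) (dx, dy) (row0.length : Int) (grid.length : Int) = true := by
            rw [out_of_bound_iff]; simp at hb ⊢; omega
          rw [if_neg hb, ha, if_pos rfl]

-- ===== VERDICT (by name: the statement is the Claim_ definition above) =====
theorem check_move_destination_spec : Claim_equal_check_move_destination := by
  intro grid position movement char_found _ hpre
  obtain ⟨x, y⟩ := position
  exact ports_agree grid movement (3 - char_found).toNat x y char_found rfl hpre.2.2.1
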